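-- pv_equiv track=rewrite | github.com/acohen1/GreggLimper | gregg_limper/response/prompt_builder.py | _merge_semantic_candidates
-- ===== SOURCE A (Python) =====
-- from typing import Any, Dict, Iterable, List, Sequence
--
-- def _merge_semantic_candidates(
--     per_fragment_candidates: Sequence[Sequence[Dict[str, Any]]],
--     limit: int,
-- ) -> List[Dict[str, Any]]:
--     """Combine semantic candidates ensuring diversity and uniqueness."""
--
--     if not per_fragment_candidates or limit <= 0:
--         return []
--
--     merged: list[dict[str, Any]] = []
--     seen_ids: set[int] = set()
--     indices = [0] * len(per_fragment_candidates)
--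
--     while len(merged) < limit:
--         progress_made = False
--         for frag_idx, candidates in enumerate(per_fragment_candidates):
--             if len(merged) >= limit:
--                 break
--
--             while indices[frag_idx] < len(candidates):
--                 candidate = candidates[indices[frag_idx]]
--                 indices[frag_idx] += 1
--
--                 candidate_id = candidate.get("id")
--                 if candidate_id is not None:
--                     if candidate_id in seen_ids:
--                         continue
--                     seen_ids.add(candidate_id)
--
--                 merged.append(candidate)
--                 progress_made = True
--                 break
--
--         if not progress_made:
--             break
--
--     return merged
-- ===== SOURCE B (Python) =====
-- from typing import Any, Dict, List, Sequence
--
--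
-- def _merge_semantic_candidates(
--     per_fragment_candidates: Sequence[Sequence[Dict[str, Any]]],
--     limit: int,
-- ) -> List[Dict[str, Any]]:
--     """Staged round-robin with no cursors and no progress flag: each pass pulls
--     one acceptable candidate off the front of every surviving fragment suffix
--     and rebuilds the pool from the non-empty remainders, so exhausted fragments
--     simply vanish and the loop ends when the pool is empty."""
--
--     def pick(cands, seen):
--         """First candidate of cands acceptable under seen, plus the unread suffix."""
--         for j, cand in enumerate(cands):
--             cid = cand.get("id")
--             if cid is None:
--                 return cand, cands[j + 1:]
--             if cid not in seen:
--                 seen.add(cid)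
--                 return cand, cands[j + 1:]
--         return None, []
--
--     merged: List[Dict[str, Any]] = []
--     seen: set = set()
--     pool = [list(f) for f in per_fragment_candidates if f]
--
--     while pool and len(merged) < limit:
--         survivors = []
--         for cands in pool:
--             if len(merged) >= limit:
--                 break
--             cand, rest = pick(cands, seen)
--             if cand is not None:
--                 merged.append(cand)
--             if rest:
--                 survivors.append(rest)
--         pool = survivors
--
--     return merged
-- ===== Notes on version B (the rewrite author's own statement) =====
-- stated objective: alternative
-- what changed: A keeps a mutable cursor array over all fragments plus a progress flag and re-sweeps every fragment (exhausted ones included) each round; B keeps no cursors and no flag: each pass pops one acceptable candidate off the front of every surviving fragment suffix and rebuilds the pool from the non-empty remainders, so exhausted fragments vanish and the loop ends when the pool is empty.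
import Mathlib
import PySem

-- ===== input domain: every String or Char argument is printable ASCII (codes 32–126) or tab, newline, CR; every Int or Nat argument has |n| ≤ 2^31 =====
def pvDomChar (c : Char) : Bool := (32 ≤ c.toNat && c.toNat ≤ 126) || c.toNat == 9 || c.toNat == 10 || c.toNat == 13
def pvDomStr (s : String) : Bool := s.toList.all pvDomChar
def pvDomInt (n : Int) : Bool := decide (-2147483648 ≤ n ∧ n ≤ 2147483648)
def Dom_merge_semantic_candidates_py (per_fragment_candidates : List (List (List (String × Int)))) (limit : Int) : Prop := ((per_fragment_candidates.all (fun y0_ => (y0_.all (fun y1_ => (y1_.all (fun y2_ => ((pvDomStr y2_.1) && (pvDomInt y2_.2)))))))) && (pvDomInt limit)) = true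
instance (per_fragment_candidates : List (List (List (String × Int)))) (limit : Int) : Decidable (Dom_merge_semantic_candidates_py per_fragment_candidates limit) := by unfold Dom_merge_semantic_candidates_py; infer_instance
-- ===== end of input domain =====

-- B replaces A's mutable cursor array, progress flag and repeated sweeps over ALL fragments
-- by staged passes over a pool of fragment SUFFIXES: each pass pops one acceptable candidate
-- off the front of every surviving suffix and rebuilds the pool from the non-empty
-- remainders, so exhausted fragments vanish and the loop ends when the pool is empty.
-- Loops are ported as structural recursion; fuel arguments equal the loop's exact iteration
-- bound (a totality guard only; the callers always pass sufficient fuel).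

-- ===== PORT A =====
-- A's inner `while indices[frag_idx] < len(candidates)` loop: starting at index i, skip
-- candidates whose id was already seen; return (new index, seen set, emitted candidate?).
-- fuel = cands.length - i, the number of remaining iterations.
def innerScanGoA : Nat → List (List (String × Int)) → Nat → PySem.Set Int →
    Nat × PySem.Set Int × Option (List (String × Int))
  | 0, _, i, seen => (i, seen, none)
  | fuel + 1, cands, i, seen =>
      if i < cands.length then
        match (PySem.Dict.mk (cands.getD i [])).get? "id" with
        | some cid =>
            if PySem.Set.contains seen cid then innerScanGoA fuel cands (i + 1) seen
            else (i + 1, PySem.Set.add seen cid, some (cands.getD i []))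
        | none => (i + 1, seen, some (cands.getD i []))
      else (i, seen, none)

def innerScanA (cands : List (List (String × Int))) (i : Nat) (seen : PySem.Set Int) :
    Nat × PySem.Set Int × Option (List (String × Int)) :=
  innerScanGoA (cands.length - i) cands i seen

-- A's `for frag_idx, candidates in enumerate(per_fragment_candidates)` pass; returns
-- (updated indices, merged, seen_ids, progress_made).
def passA (frags : List (List (List (String × Int)))) (inds : List Nat)
    (merged : List (List (String × Int))) (seen : PySem.Set Int) (limit : Int)
    (progress : Bool) :
    List Nat × List (List (String × Int)) × PySem.Set Int × Bool :=
  match frags, inds with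
  | f :: fs, i :: is =>
      if (merged.length : Int) < limit then
        let r := innerScanA f i seen
        match r.2.2 with
        | some c =>
            let t := passA fs is (merged ++ [c]) r.2.1 limit true
            (r.1 :: t.1, t.2)
        | none =>
            let t := passA fs is merged r.2.1 limit progress
            (r.1 :: t.1, t.2)
      else (i :: is, merged, seen, progress)
  | _, _ => (inds, merged, seen, progress)

-- candidates still unread according to the index vector (bound on A's remaining passes)
def sumRem : List (List (List (String × Int))) → List Nat → Nat
  | f :: fs, i :: is => (f.length - i) + sumRem fs is
  | _, _ => 0

-- A's outer `while len(merged) < limit` loop; fuel bounds the number of passes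
-- (every pass that continues strictly decreases sumRem).
def outGoA : Nat → List (List (List (String × Int))) → List Nat →
    List (List (String × Int)) → PySem.Set Int → Int → List (List (String × Int))
  | 0, _, _, merged, _, _ => merged
  | fuel + 1, frags, inds, merged, seen, limit =>
      if (merged.length : Int) < limit then
        if (passA frags inds merged seen limit false).2.2.2 = true then
          outGoA fuel frags (passA frags inds merged seen limit false).1
            (passA frags inds merged seen limit false).2.1
            (passA frags inds merged seen limit false).2.2.1 limit
        else (passA frags inds merged seen limit false).2.1
      else merged

def outerA (frags : List (List (List (String × Int)))) (inds : List Nat)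
    (merged : List (List (String × Int))) (seen : PySem.Set Int) (limit : Int) :
    List (List (String × Int)) :=
  outGoA (sumRem frags inds + 1) frags inds merged seen limit

def merge_semantic_candidates_py (per_fragment_candidates : List (List (List (String × Int)))) (limit : Int) : List (List (String × Int)) :=
  if per_fragment_candidates.isEmpty ∨ limit ≤ 0 then []
  else
    outerA per_fragment_candidates (List.replicate per_fragment_candidates.length 0) []
      PySem.Set.empty limit

-- ===== PORT B =====
-- Source B's `pick`: first candidate of cands acceptable under seen, plus the unread suffix
-- (the Python for-loop over `enumerate` with a slice is the obvious structural recursion).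
def pickB : List (List (String × Int)) → PySem.Set Int →
    Option (List (String × Int)) × List (List (String × Int)) × PySem.Set Int
  | [], seen => (none, [], seen)
  | c :: rest, seen =>
      match (PySem.Dict.mk c).get? "id" with
      | some cid =>
          if PySem.Set.contains seen cid then pickB rest seen
          else (some c, rest, PySem.Set.add seen cid)
      | none => (some c, rest, seen)

-- `if cand is not None: merged.append(cand)`
def mrg (m : List (List (String × Int))) (o : Option (List (String × Int))) :
    List (List (String × Int)) :=
  match o with
  | some c => m ++ [c]
  | none => m

-- Source B's `for cands in pool` pass: returns (merged, seen, survivors)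
def passB : List (List (List (String × Int))) → List (List (String × Int)) →
    PySem.Set Int → Int →
    List (List (String × Int)) × PySem.Set Int × List (List (List (String × Int)))
  | [], m, seen, _ => (m, seen, [])
  | f :: fs, m, seen, limit =>
      if (m.length : Int) < limit then
        let r := pickB f seen
        let t := passB fs (mrg m r.1) r.2.2 limit
        (t.1, t.2.1, (if r.2.1.isEmpty then [] else [r.2.1]) ++ t.2.2)
      else (m, seen, [])

-- pool measure: unread candidates plus pool length (bound on the number of passes)
def mB (q : List (List (List (String × Int)))) : Nat := (q.map List.length).sum + q.length

-- Source B's `while pool and len(merged) < limit` loop; fuel bounds the passes.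
def outGoB : Nat → List (List (List (String × Int))) → List (List (String × Int)) →
    PySem.Set Int → Int → List (List (String × Int))
  | 0, _, m, _, _ => m
  | _ + 1, [], m, _, _ => m
  | fuel + 1, f :: fs, m, seen, limit =>
      if (m.length : Int) < limit then
        let t := passB (f :: fs) m seen limit
        outGoB fuel t.2.2 t.1 t.2.1 limit
      else m

def bLoop (pool : List (List (List (String × Int)))) (m : List (List (String × Int)))
    (seen : PySem.Set Int) (limit : Int) : List (List (String × Int)) :=
  outGoB (mB pool) pool m seen limit

def merge_semantic_candidates_py_alt (per_fragment_candidates : List (List (List (String × Int)))) (limit : Int) : List (List (String × Int)) :=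
  bLoop (per_fragment_candidates.filter (fun c => !c.isEmpty)) [] PySem.Set.empty limit

-- ===== PRECONDITION & SPEC =====
def Spec_merge_semantic_candidates_py (per_fragment_candidates : List (List (List (String × Int)))) (limit : Int) (out : List (List (String × Int))) : Prop := out = merge_semantic_candidates_py_alt per_fragment_candidates limit
instance (per_fragment_candidates : List (List (List (String × Int)))) (limit : Int) (out : List (List (String × Int))) : Decidable (Spec_merge_semantic_candidates_py per_fragment_candidates limit out) := by unfold Spec_merge_semantic_candidates_py; infer_instance

-- ===== CLAIM (what is proved, stated in full; the proofs are below) =====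
def Claim_equal_merge_semantic_candidates_py : Prop := ∀ (per_fragment_candidates : List (List (List (String × Int)))) (limit : Int), Dom_merge_semantic_candidates_py per_fragment_candidates limit → Spec_merge_semantic_candidates_py per_fragment_candidates limit (merge_semantic_candidates_py per_fragment_candidates limit)

-- ===== LEMMAS AND PROOFS =====

-- the fragment suffixes still alive according to A's index vector, in fragment order
def sufOf : List (List (List (String × Int))) → List Nat → List (List (List (String × Int)))
  | f :: fs, i :: is => (if i < f.length then [f.drop i] else []) ++ sufOf fs is
  | _, _ => []

theorem innerScanGoA_none (fuel : Nat) (cands : List (List (String × Int))) (i : Nat)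
    (seen : PySem.Set Int) (hf : cands.length - i ≤ fuel)
    (h : (innerScanGoA fuel cands i seen).2.2 = none) :
    cands.length ≤ (innerScanGoA fuel cands i seen).1 := by
  fun_induction innerScanGoA fuel cands i seen
  all_goals simp_all
  all_goals omega

theorem innerScanGoA_emit (fuel : Nat) (cands : List (List (String × Int))) (i : Nat)
    (seen : PySem.Set Int) (c : List (String × Int))
    (h : (innerScanGoA fuel cands i seen).2.2 = some c) :
    i < (innerScanGoA fuel cands i seen).1 ∧ i < cands.length := by
  fun_induction innerScanGoA fuel cands i seen
  all_goals simp_all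
  all_goals omega

theorem innerScanA_emit (cands : List (List (String × Int))) (i : Nat) (seen : PySem.Set Int)
    (c : List (String × Int)) (h : (innerScanA cands i seen).2.2 = some c) :
    i < (innerScanA cands i seen).1 ∧ i < cands.length :=
  innerScanGoA_emit _ cands i seen c h

theorem innerScanA_none (cands : List (List (String × Int))) (i : Nat) (seen : PySem.Set Int)
    (h : (innerScanA cands i seen).2.2 = none) :
    cands.length ≤ (innerScanA cands i seen).1 :=
  innerScanGoA_none _ cands i seen (le_refl _) h

theorem innerScanA_oob (cands : List (List (String × Int))) (i : Nat) (seen : PySem.Set Int)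
    (h : ¬ i < cands.length) : innerScanA cands i seen = (i, seen, none) := by
  unfold innerScanA
  have : cands.length - i = 0 := by omega
  rw [this]
  rfl

theorem passA_sumRem (fs : List (List (List (String × Int)))) :
    ∀ (is : List Nat) (m : List (List (String × Int))) (s : PySem.Set Int) (limit : Int)
      (p : Bool),
      sumRem fs (passA fs is m s limit p).1 ≤ sumRem fs is ∧
        ((passA fs is m s limit p).2.2.2 = true →
          p = true ∨ sumRem fs (passA fs is m s limit p).1 < sumRem fs is) := by
  induction fs with
  | nil => intro is m s limit p; simp [passA, sumRem]
  | cons f fs ih =>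
      intro is m s limit p
      cases is with
      | nil => simp [passA, sumRem]
      | cons i is =>
          by_cases hm : (m.length : Int) < limit
          · simp only [passA, if_pos hm]
            cases hr : (innerScanA f i s).2.2 with
            | some c =>
                have hlt := innerScanA_emit f i s c hr
                have ht := ih is (m ++ [c]) (innerScanA f i s).2.1 limit true
                simp only [sumRem]
                constructor
                · omega
                · intro _; right; omega
            | none =>
                have hn := innerScanA_none f i s hr
                have ht := ih is m (innerScanA f i s).2.1 limit p
                simp only [sumRem]
                constructor
                · omega
                · intro hp
                  rcases ht.2 hp with hp' | hlt
                  · exact Or.inl hp'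
                  · right; omega
          · simp only [passA, if_neg hm, sumRem]
            exact ⟨le_refl _, fun h => Or.inl h⟩

theorem passA_length (fs : List (List (List (String × Int)))) :
    ∀ (is : List Nat) (m : List (List (String × Int))) (s : PySem.Set Int) (limit : Int)
      (p : Bool), (passA fs is m s limit p).1.length = is.length := by
  induction fs with
  | nil => intro is m s limit p; simp [passA]
  | cons f fs ih =>
      intro is m s limit p
      cases is with
      | nil => simp [passA]
      | cons i is =>
          by_cases hm : (m.length : Int) < limit
          · simp only [passA, if_pos hm]
            cases hr : (innerScanA f i s).2.2 <;> simp [ih]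
          · simp [passA, if_neg hm]

theorem passA_stop (fs : List (List (List (String × Int)))) (is : List Nat)
    (m : List (List (String × Int))) (s : PySem.Set Int) (limit : Int) (p : Bool)
    (hm : ¬ (m.length : Int) < limit) : passA fs is m s limit p = (is, m, s, p) := by
  cases fs with
  | nil => simp [passA]
  | cons f fs =>
      cases is with
      | nil => simp [passA]
      | cons i is => simp [passA, if_neg hm]

-- pickB on the suffix f.drop i computes exactly A's inner scan from index i
theorem pick_drop (f : List (List (String × Int))) :
    ∀ (n i : Nat) (s : PySem.Set Int), f.length - i ≤ n → i ≤ f.length →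
      pickB (f.drop i) s =
        ((innerScanA f i s).2.2, f.drop (innerScanA f i s).1, (innerScanA f i s).2.1) := by
  intro n
  induction n with
  | zero =>
      intro i s hn hi
      have hieq : i = f.length := by omega
      subst hieq
      rw [innerScanA_oob f f.length s (by omega)]
      simp [pickB]
  | succ n ih =>
      intro i s hn hi
      by_cases hlt : i < f.length
      · have hdrop : f.drop i = f[i] :: f.drop (i + 1) := List.drop_eq_getElem_cons hlt
        have hget : f.getD i [] = f[i] := by
          simp [List.getD_eq_getElem?_getD, List.getElem?_eq_getElem hlt]
        unfold innerScanA
        rcases hk : f.length - i with _ | k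
        · omega
        · rw [innerScanGoA]
          simp only [if_pos hlt, hget]
          rw [hdrop, pickB]
          rcases hg : (PySem.Dict.mk f[i]).get? "id" with _ | cid
          · simp
          · by_cases hc : PySem.Set.contains s cid = true
            · simp only [if_pos hc]
              have := ih (i + 1) s (by omega) (by omega)
              unfold innerScanA at this
              have hk2 : f.length - (i + 1) = k := by omega
              rw [hk2] at this
              exact this
            · rw [PySem.Set.contains_iff] at hc
              simp [hc]
      · have hieq : i = f.length := by omega
        subst hieq
        rw [innerScanA_oob f f.length s (by omega)]
        simp [pickB]

theorem pick_drop' (f : List (List (String × Int))) (i : Nat) (s : PySem.Set Int)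
    (hi : i ≤ f.length) :
    pickB (f.drop i) s =
      ((innerScanA f i s).2.2, f.drop (innerScanA f i s).1, (innerScanA f i s).2.1) :=
  pick_drop f (f.length - i) i s (le_refl _) hi

-- pickB consumes at least one element of a non-empty list
theorem pickB_len (f : List (List (String × Int))) :
    ∀ (s : PySem.Set Int), (pickB f s).2.1.length ≤ f.length - 1 := by
  induction f with
  | nil => intro s; simp [pickB]
  | cons c rest ih =>
      intro s
      rw [pickB]
      rcases hg : (PySem.Dict.mk c).get? "id" with _ | cid
      · simp
      · by_cases hc : PySem.Set.contains s cid = true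
        · simp only [if_pos hc]
          have := ih s
          simp only [List.length_cons]
          omega
        · rw [PySem.Set.contains_iff] at hc
          simp [hc]

theorem passB_measure (fs : List (List (List (String × Int)))) :
    ∀ (m : List (List (String × Int))) (s : PySem.Set Int) (limit : Int),
      mB (passB fs m s limit).2.2 ≤ mB fs ∧
        (fs ≠ [] → (m.length : Int) < limit → mB (passB fs m s limit).2.2 < mB fs) := by
  induction fs with
  | nil => intro m s limit; simp [passB, mB]
  | cons f fs ih =>
      intro m s limit
      by_cases hm : (m.length : Int) < limit
      · simp only [passB, if_pos hm]
        have hlen := pickB_len f s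
        have ht := (ih (mrg m (pickB f s).1) (pickB f s).2.2 limit).1
        by_cases he : (pickB f s).2.1.isEmpty = true
        · rw [if_pos he, List.nil_append]
          simp only [mB, List.map_cons, List.sum_cons, List.length_cons] at *
          exact ⟨by omega, fun _ _ => by omega⟩
        · rw [if_neg he]
          have hne : (pickB f s).2.1 ≠ [] := by simpa using he
          have hf : f ≠ [] := by
            rintro rfl
            simp [pickB] at hne
          have hf1 : f.length ≠ 0 := fun h0 => hf (List.eq_nil_of_length_eq_zero h0)
          simp only [mB, List.map_append, List.sum_append, List.map_cons, List.sum_cons,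
            List.map_nil, List.sum_nil, List.length_append, List.length_cons,
            List.length_nil] at *
          exact ⟨by omega, fun _ _ => by omega⟩
      · simp only [passB, if_neg hm]
        refine ⟨by simp [mB], fun _ hml => absurd hml hm⟩

theorem outGoB_irrel (fuel : Nat) :
    ∀ (q : List (List (List (String × Int)))) (m : List (List (String × Int)))
      (s : PySem.Set Int) (limit : Int), mB q ≤ fuel →
      outGoB fuel q m s limit = outGoB (mB q) q m s limit := by
  induction fuel using Nat.strong_induction_on with
  | _ fuel ih =>
      intro q m s limit h
      cases q with
      | nil => cases fuel <;> rfl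
      | cons f fs =>
          have hq1 : 1 ≤ mB (f :: fs) := by simp [mB]; omega
          cases fuel with
          | zero => omega
          | succ fuel =>
              rcases hk : mB (f :: fs) with _ | k
              · omega
              · rw [outGoB, outGoB]
                by_cases hm : (m.length : Int) < limit
                · simp only [if_pos hm]
                  have hlt := (passB_measure (f :: fs) m s limit).2 (by simp) hm
                  rw [ih fuel (by omega) _ _ _ _ (by omega),
                    ih k (by omega) _ _ _ _ (by omega)]
                · simp only [if_neg hm]

theorem bLoop_nil (m : List (List (String × Int))) (s : PySem.Set Int) (limit : Int) :
    bLoop [] m s limit = m := rfl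

theorem bLoop_cons (f : List (List (String × Int))) (fs : List (List (List (String × Int))))
    (m : List (List (String × Int))) (s : PySem.Set Int) (limit : Int) :
    bLoop (f :: fs) m s limit =
      if (m.length : Int) < limit then
        bLoop (passB (f :: fs) m s limit).2.2 (passB (f :: fs) m s limit).1
          (passB (f :: fs) m s limit).2.1 limit
      else m := by
  unfold bLoop
  rcases hk : mB (f :: fs) with _ | k
  · have : 1 ≤ mB (f :: fs) := by simp [mB]; omega
    omega
  · rw [outGoB]
    by_cases hm : (m.length : Int) < limit
    · simp only [if_pos hm]
      have hlt := (passB_measure (f :: fs) m s limit).2 (by simp) hm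
      rw [outGoB_irrel k _ _ _ _ (by omega)]
    · simp only [if_neg hm]

-- when every live suffix is gone, A's pass is the identity
theorem sufOf_nil_pass (fs : List (List (List (String × Int)))) :
    ∀ (is : List Nat) (m : List (List (String × Int))) (s : PySem.Set Int) (limit : Int)
      (p : Bool), sufOf fs is = [] → passA fs is m s limit p = (is, m, s, p) := by
  induction fs with
  | nil => intro is m s limit p _; simp [passA]
  | cons f fs ih =>
      intro is m s limit p hsuf
      cases is with
      | nil => simp [passA]
      | cons i is =>
          simp only [sufOf, List.append_eq_nil_iff] at hsuf
          have hi : ¬ i < f.length := by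
            by_contra hc
            rw [if_pos hc] at hsuf
            exact absurd hsuf.1 (by simp)
          by_cases hm : (m.length : Int) < limit
          · simp only [passA, if_pos hm, innerScanA_oob f i s hi]
            rw [ih is m s limit p hsuf.2]
          · simp [passA, if_neg hm]

-- one pass of B over the live suffixes computes exactly one pass of A's for-loop
theorem pass_corr (fs : List (List (List (String × Int)))) :
    ∀ (is : List Nat) (m : List (List (String × Int))) (s : PySem.Set Int) (limit : Int)
      (p : Bool), is.length = fs.length →
      (passB (sufOf fs is) m s limit).1 = (passA fs is m s limit p).2.1 ∧
      (passB (sufOf fs is) m s limit).2.1 = (passA fs is m s limit p).2.2.1 ∧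
      ((passB (sufOf fs is) m s limit).2.2 = sufOf fs (passA fs is m s limit p).1 ∨
        ¬ (((passA fs is m s limit p).2.1.length : Int) < limit)) ∧
      (p = true → (passA fs is m s limit p).2.2.2 = true) ∧
      ((passA fs is m s limit p).2.2.2 = false → (m.length : Int) < limit →
        sufOf fs (passA fs is m s limit p).1 = [] ∧
          (passA fs is m s limit p).2.1 = m) := by
  induction fs with
  | nil =>
      intro is m s limit p hlen
      have : is = [] := List.eq_nil_of_length_eq_zero hlen
      subst this
      simp [sufOf, passB, passA]
  | cons f fs ih =>
      intro is m s limit p hlen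
      cases is with
      | nil => simp at hlen
      | cons i is =>
          have hlen' : is.length = fs.length := by simpa using hlen
          by_cases hm : (m.length : Int) < limit
          · by_cases hi : i < f.length
            · -- live head suffix
              simp only [sufOf, if_pos hi, List.singleton_append]
              rw [passA]
              simp only [if_pos hm]
              rw [passB]
              simp only [if_pos hm, pick_drop' f i s (by omega)]
              cases hr : (innerScanA f i s).2.2 with
              | some c =>
                  have hIH := ih is (m ++ [c]) (innerScanA f i s).2.1 limit true hlen'
                  obtain ⟨c1, c2, c3, c4, c5⟩ := hIH
                  simp only [mrg]
                  refine ⟨c1, c2, ?_, fun _ => c4 rfl, ?_⟩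
                  · rcases c3 with c3 | c3
                    · left
                      rw [sufOf]
                      have : f.drop (innerScanA f i s).1 = [] ↔
                          ¬ (innerScanA f i s).1 < f.length := by
                        rw [List.drop_eq_nil_iff]; omega
                      by_cases hjs : (innerScanA f i s).1 < f.length
                      · have : (f.drop (innerScanA f i s).1).isEmpty = false := by
                          simp [List.drop_eq_nil_iff]; omega
                        simp [this, hjs, c3]
                      · have : (f.drop (innerScanA f i s).1).isEmpty = true := by
                          simp [List.drop_eq_nil_iff]; omega
                        simp [this, hjs, c3]
                    · right; exact c3
                  · intro hfalse _
                    exact absurd (c4 rfl) (by simp [hfalse])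
              | none =>
                  have hIH := ih is m (innerScanA f i s).2.1 limit p hlen'
                  obtain ⟨c1, c2, c3, c4, c5⟩ := hIH
                  have hno := innerScanA_none f i s hr
                  have hde : (f.drop (innerScanA f i s).1).isEmpty = true := by
                    simp [List.drop_eq_nil_iff]; omega
                  have hjs : ¬ (innerScanA f i s).1 < f.length := by omega
                  simp only [mrg, hde]
                  refine ⟨c1, c2, ?_, c4, ?_⟩
                  · rcases c3 with c3 | c3
                    · left; rw [sufOf]; simp [hjs, c3]
                    · right; exact c3
                  · intro hfalse _
                    have h5 := c5 hfalse hm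
                    refine ⟨?_, h5.2⟩
                    rw [sufOf]; simp [hjs, h5.1]
            · -- exhausted head: A scans it trivially, B's pool never held it
              simp only [sufOf, if_neg hi, List.nil_append]
              rw [passA]
              simp only [if_pos hm, innerScanA_oob f i s hi]
              have hIH := ih is m s limit p hlen'
              obtain ⟨c1, c2, c3, c4, c5⟩ := hIH
              refine ⟨c1, c2, ?_, c4, ?_⟩
              · rcases c3 with c3 | c3
                · left; rw [sufOf]; simp [hi, c3]
                · right; exact c3
              · intro hfalse _
                have h5 := c5 hfalse hm
                refine ⟨?_, h5.2⟩
                rw [sufOf]; simp [hi, h5.1]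
          · -- limit already reached: A breaks, B stops
            rw [passA_stop _ _ _ _ _ _ hm]
            cases hq : sufOf (f :: fs) (i :: is) with
            | nil => simp [passB, hm]
            | cons e es =>
                rw [passB]
                simp only [if_neg hm]
                simp [hm]

theorem outGoA_irrel (fuel : Nat) :
    ∀ (fs : List (List (List (String × Int)))) (is : List Nat)
      (m : List (List (String × Int))) (s : PySem.Set Int) (limit : Int),
      sumRem fs is < fuel →
      outGoA fuel fs is m s limit = outGoA (sumRem fs is + 1) fs is m s limit := by
  induction fuel using Nat.strong_induction_on with
  | _ fuel ih =>
      intro fs is m s limit h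
      cases fuel with
      | zero => omega
      | succ fuel =>
          rw [outGoA, outGoA]
          by_cases hm : (m.length : Int) < limit
          · simp only [if_pos hm]
            by_cases hp : (passA fs is m s limit false).2.2.2 = true
            · simp only [if_pos hp]
              rcases (passA_sumRem fs is m s limit false).2 hp with hx | hlt
              · exact absurd hx (by simp)
              · rw [ih fuel (by omega) _ _ _ _ _ (by omega),
                  ih (sumRem fs is) (by omega) _ _ _ _ _ (by omega)]
            · simp only [if_neg hp]
          · simp only [if_neg hm]

theorem outerA_eq (fs : List (List (List (String × Int)))) (is : List Nat)
    (m : List (List (String × Int))) (s : PySem.Set Int) (limit : Int) :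
    outerA fs is m s limit =
      if (m.length : Int) < limit then
        if (passA fs is m s limit false).2.2.2 = true then
          outerA fs (passA fs is m s limit false).1 (passA fs is m s limit false).2.1
            (passA fs is m s limit false).2.2.1 limit
        else (passA fs is m s limit false).2.1
      else m := by
  unfold outerA
  rw [outGoA]
  by_cases hm : (m.length : Int) < limit
  · simp only [if_pos hm]
    by_cases hp : (passA fs is m s limit false).2.2.2 = true
    · simp only [if_pos hp]
      rcases (passA_sumRem fs is m s limit false).2 hp with hx | hlt
      · exact absurd hx (by simp)
      · rw [outGoA_irrel (sumRem fs is) _ _ _ _ _ (by omega)]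
    · simp only [if_neg hp]
  · simp only [if_neg hm]

-- A's outer while-loop equals B's pool loop started on the live suffixes
theorem mainEq (n : Nat) :
    ∀ (fs : List (List (List (String × Int)))) (is : List Nat)
      (m : List (List (String × Int))) (s : PySem.Set Int) (limit : Int),
      sumRem fs is ≤ n → is.length = fs.length →
      outerA fs is m s limit = bLoop (sufOf fs is) m s limit := by
  induction n using Nat.strong_induction_on with
  | _ n ih =>
      intro fs is m s limit hn hlen
      by_cases hm : (m.length : Int) < limit
      · obtain ⟨c1, c2, c3, c4, c5⟩ := pass_corr fs is m s limit false hlen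
        rw [outerA_eq]
        simp only [if_pos hm]
        cases hq : sufOf fs is with
        | nil =>
            rw [bLoop_nil]
            rw [sufOf_nil_pass fs is m s limit false hq]
            simp
        | cons e es =>
            rw [bLoop_cons]
            simp only [if_pos hm]
            rw [← hq, c1, c2]
            by_cases hp : (passA fs is m s limit false).2.2.2 = true
            · simp only [if_pos hp]
              rcases c3 with c3 | c3
              · rw [c3]
                rcases (passA_sumRem fs is m s limit false).2 hp with hx | hlt
                · exact absurd hx (by simp)
                · have hlen2 : (passA fs is m s limit false).1.length = fs.length := by
                    rw [passA_length]; exact hlen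
                  exact ih (sumRem fs (passA fs is m s limit false).1) (by omega) fs _ _
                    _ limit (le_refl _) hlen2
              · rw [outerA_eq]
                simp only [if_neg c3]
                cases hq2 : (passB (sufOf fs is) m s limit).2.2 with
                | nil => rw [bLoop_nil]
                | cons e2 es2 => rw [bLoop_cons]; simp only [if_neg c3]
            · simp only [if_neg hp]
              have h5 := c5 (Bool.eq_false_iff.mpr hp) hm
              rcases c3 with c3 | c3
              · rw [c3, h5.1, bLoop_nil]
              · rw [h5.2] at c3
                exact absurd hm c3
      · rw [outerA_eq]
        simp only [if_neg hm]
        cases hq : sufOf fs is with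
        | nil => rw [bLoop_nil]
        | cons e es =>
            rw [bLoop_cons]
            simp [if_neg hm]

theorem sufOf_replicate (pf : List (List (List (String × Int)))) :
    sufOf pf (List.replicate pf.length 0) = pf.filter (fun c => !c.isEmpty) := by
  induction pf with
  | nil => rfl
  | cons f fs ih =>
      cases f with
      | nil => simpa [sufOf, List.replicate_succ] using ih
      | cons x xs => simpa [sufOf, List.replicate_succ] using ih

-- ===== VERDICT (by name: the statement is the Claim_ definition above) =====
theorem merge_semantic_candidates_py_spec : Claim_equal_merge_semantic_candidates_py := by
  intro pf limit _
  unfold Spec_merge_semantic_candidates_py merge_semantic_candidates_py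
    merge_semantic_candidates_py_alt
  by_cases h : pf.isEmpty = true ∨ limit ≤ 0
  · rw [if_pos h]
    rcases h with h | h
    · have : pf = [] := List.isEmpty_iff.mp h
      subst this
      simp [bLoop_nil]
    · cases hq : pf.filter (fun c => !c.isEmpty) with
      | nil => rw [bLoop_nil]
      | cons e es =>
          rw [bLoop_cons]
          have : ¬ ((([] : List (List (String × Int))).length : Int) < limit) := by
            simp; omega
          rw [if_neg this]
  · rw [if_neg h]
    rw [mainEq (sumRem pf (List.replicate pf.length 0)) pf _ _ _ limit (le_refl _)
      (by simp)]
    rw [sufOf_replicate]
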